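-- pv_equiv track=rewrite | github.com/711mt/SPA | gradivo do binarnog stabla/II nedelja - rekurzija/rekurzija.py | poslednje_veliko_slovo
-- ===== SOURCE A (Python) =====
-- def poslednje_veliko_slovo(slovo,recenica,i):
--     if i == len(recenica):
--         if slovo:
--             return slovo
--         else:
--             return 'Nema velikih slova'
--     else:
--         if recenica[i].isupper():
--             slovo = recenica[i]
--             return poslednje_veliko_slovo(slovo,recenica,i+1)
--         else:
--             return poslednje_veliko_slovo(slovo,recenica,i+1)
-- ===== SOURCE B (Python) =====
-- def poslednje_veliko_slovo(slovo, recenica, i):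
--     for ch in reversed(recenica[max(i, 0):]):
--         if ch.isupper():
--             return ch
--     return slovo if slovo else 'Nema velikih slova'
-- ===== Notes on version B (the rewrite author's own statement) =====
-- stated objective: alternative
-- what changed: Replaces the forward recursion with a last-uppercase accumulator by a reverse scan over the slice recenica[max(i,0):] that returns the first uppercase it meets (no accumulator, no recursion, early exit).
import Mathlib
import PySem

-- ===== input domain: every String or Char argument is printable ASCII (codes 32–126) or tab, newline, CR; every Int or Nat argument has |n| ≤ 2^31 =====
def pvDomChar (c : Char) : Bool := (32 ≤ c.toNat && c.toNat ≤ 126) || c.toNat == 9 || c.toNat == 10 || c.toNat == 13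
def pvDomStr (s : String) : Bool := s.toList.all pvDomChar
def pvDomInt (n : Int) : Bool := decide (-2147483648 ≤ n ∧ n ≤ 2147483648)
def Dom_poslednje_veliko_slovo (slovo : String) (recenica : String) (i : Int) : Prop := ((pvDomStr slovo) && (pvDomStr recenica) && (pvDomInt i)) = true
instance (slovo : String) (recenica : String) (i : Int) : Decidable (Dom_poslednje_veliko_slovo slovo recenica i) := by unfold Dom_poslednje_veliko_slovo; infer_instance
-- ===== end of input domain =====

-- B replaces A's forward recursion (with a running last-uppercase accumulator) by a reverse scan
-- of the slice recenica[max(i,0):] that returns the first uppercase it meets (objective: alternative).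

-- ===== PORT A =====
-- recenica[i] is PySem.List.pyGet? on the code points; where it is none Python raises IndexError
-- (excluded by Pre_) and the port returns "".
def poslednje_veliko_slovo (slovo : String) (recenica : String) (i : Int) : String :=
  if i = (recenica.toList.length : Int) then
    if slovo.toList ≠ [] then slovo else "Nema velikih slova"
  else
    match h : PySem.List.pyGet? recenica.toList i with
    | none => ""  -- IndexError in Python; outside Pre_
    | some c =>
      if PySem.Chars.isupper c then
        poslednje_veliko_slovo (String.ofList [c]) recenica (i + 1)
      else
        poslednje_veliko_slovo slovo recenica (i + 1)
termination_by ((recenica.toList.length : Int) - i).toNat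
decreasing_by
  all_goals
    have hin : PySem.Raise.InRange recenica.toList.length i := by
      by_contra hc
      rw [← PySem.List.pyGet?_eq_none_iff recenica.toList i] at hc
      simp [h] at hc
    unfold PySem.Raise.InRange at hin
    omega

-- ===== PORT B =====
-- for ch in reversed(recenica[max(i, 0):]): if ch.isupper(): return ch
def pvFindUpper : List Char → Option Char
  | [] => none
  | c :: cs => if PySem.Chars.isupper c then some c else pvFindUpper cs

def poslednje_veliko_slovo_alt (slovo : String) (recenica : String) (i : Int) : String :=
  match pvFindUpper (PySem.List.slice recenica.toList (some (max i 0)) none).reverse with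
  | some c => String.ofList [c]
  | none => if slovo.toList ≠ [] then slovo else "Nema velikih slova"

-- ===== PRECONDITION & SPEC =====
-- Pre_ excludes exactly the IndexError inputs of A: |i| beyond len(recenica).
def Pre_poslednje_veliko_slovo (slovo : String) (recenica : String) (i : Int) : Prop :=
  -(recenica.toList.length : Int) ≤ i ∧ i ≤ (recenica.toList.length : Int)
instance (slovo : String) (recenica : String) (i : Int) : Decidable (Pre_poslednje_veliko_slovo slovo recenica i) := by unfold Pre_poslednje_veliko_slovo; infer_instance

def pvWitness_poslednje_veliko_slovo : String × String × Int := ("", "aAb", 0)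

def Spec_poslednje_veliko_slovo (slovo : String) (recenica : String) (i : Int) (out : String) : Prop := out = poslednje_veliko_slovo_alt slovo recenica i
instance (slovo : String) (recenica : String) (i : Int) (out : String) : Decidable (Spec_poslednje_veliko_slovo slovo recenica i out) := by unfold Spec_poslednje_veliko_slovo; infer_instance

-- ===== CLAIM (what is proved, stated in full; the proofs are below) =====
def Claim_equal_poslednje_veliko_slovo : Prop := ∀ (slovo : String) (recenica : String) (i : Int), Dom_poslednje_veliko_slovo slovo recenica i → Pre_poslednje_veliko_slovo slovo recenica i → Spec_poslednje_veliko_slovo slovo recenica i (poslednje_veliko_slovo slovo recenica i)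

-- ===== LEMMAS AND PROOFS =====

-- the value B computes on a scanned tail t, as a function of the tail
def pvOut (slovo : String) (t : List Char) : String :=
  match pvFindUpper t.reverse with
  | some c => String.ofList [c]
  | none => if slovo.toList ≠ [] then slovo else "Nema velikih slova"

theorem pvAlt_eq (slovo recenica : String) (i : Int) :
    poslednje_veliko_slovo_alt slovo recenica i = pvOut slovo (recenica.toList.drop (max i 0).toNat) := by
  unfold poslednje_veliko_slovo_alt pvOut
  rw [PySem.List.slice_from recenica.toList (le_max_right i 0)]

theorem pvFindUpper_append (xs ys : List Char) :
    pvFindUpper (xs ++ ys) = (pvFindUpper xs).or (pvFindUpper ys) := by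
  induction xs with
  | nil => simp [pvFindUpper]
  | cons c cs ih =>
    simp only [List.cons_append, pvFindUpper]
    split_ifs <;> simp [ih]

theorem pvFindUpper_ne_none {xs : List Char} {c : Char} (hc : c ∈ xs)
    (hu : PySem.Chars.isupper c = true) : pvFindUpper xs ≠ none := by
  induction xs with
  | nil => cases hc
  | cons d ds ih =>
    simp only [pvFindUpper]
    split_ifs with hd
    · simp
    · rcases List.mem_cons.1 hc with h | h
      · subst h; exact absurd hu hd
      · exact ih h

theorem pvOut_congr (s1 s2 : String) (t : List Char) (h : pvFindUpper t.reverse ≠ none) :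
    pvOut s1 t = pvOut s2 t := by
  unfold pvOut
  cases hf : pvFindUpper t.reverse with
  | none => exact absurd hf h
  | some c => rfl

theorem pvA_nonneg (recenica : String) :
    ∀ (d k : Nat) (slovo : String), recenica.toList.length - k = d → k ≤ recenica.toList.length →
      poslednje_veliko_slovo slovo recenica (k : Int) = pvOut slovo (recenica.toList.drop k) := by
  intro d
  induction d with
  | zero =>
    intro k slovo hd hk
    have hk' : k = recenica.toList.length := by omega
    subst hk'
    unfold poslednje_veliko_slovo
    rw [if_pos rfl]
    unfold pvOut
    rw [List.drop_length]
    rfl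
  | succ d ih =>
    intro k slovo hd hk
    have hklt : k < recenica.toList.length := by omega
    have hg : PySem.List.pyGet? recenica.toList (k : Int) = some (recenica.toList[k]) := by
      rw [PySem.List.pyGet?_eq_some_getElem recenica.toList (by positivity) (by exact_mod_cast hklt)]
      simp
    have hdrop : recenica.toList.drop k = recenica.toList[k] :: recenica.toList.drop (k + 1) :=
      List.drop_eq_getElem_cons hklt
    have hcast : (k : Int) + 1 = ((k + 1 : Nat) : Int) := by push_cast; ring
    have hrec : ∀ s : String, poslednje_veliko_slovo s recenica ((k : Int) + 1)
        = pvOut s (recenica.toList.drop (k + 1)) := by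
      intro s; rw [hcast]; exact ih (k + 1) s (by omega) (by omega)
    unfold poslednje_veliko_slovo
    rw [if_neg (by push_cast; omega)]
    split
    · next heq => rw [hg] at heq; cases heq
    · next c heq =>
      rw [hg] at heq
      injection heq with heq; subst heq
      have hout : pvOut slovo (recenica.toList.drop k)
          = match (pvFindUpper (recenica.toList.drop (k + 1)).reverse).or
              (pvFindUpper [recenica.toList[k]]) with
            | some c => String.ofList [c]
            | none => if slovo.toList ≠ [] then slovo else "Nema velikih slova" := by
        unfold pvOut
        rw [hdrop, List.reverse_cons, pvFindUpper_append]
      split_ifs with hu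
      · rw [hrec, hout]
        cases hf : pvFindUpper (recenica.toList.drop (k + 1)).reverse with
        | some e => unfold pvOut; rw [hf]; simp
        | none => unfold pvOut; rw [hf]; simp [pvFindUpper, hu]
      · rw [hrec, hout]
        cases hf : pvFindUpper (recenica.toList.drop (k + 1)).reverse with
        | some e => unfold pvOut; rw [hf]; simp
        | none => unfold pvOut; rw [hf]; simp [pvFindUpper, hu]

theorem pvA_nonneg' (recenica : String) (k : Nat) (slovo : String) (hk : k ≤ recenica.toList.length) :
    poslednje_veliko_slovo slovo recenica (k : Int) = pvOut slovo (recenica.toList.drop k) :=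
  pvA_nonneg recenica (recenica.toList.length - k) k slovo rfl hk

theorem pvA_neg (recenica : String) :
    ∀ (m : Nat) (slovo : String), 0 < m → m ≤ recenica.toList.length →
      poslednje_veliko_slovo slovo recenica (-(m : Int)) = pvOut slovo recenica.toList := by
  intro m
  induction m with
  | zero => intro slovo h0 _; exact absurd h0 (Nat.lt_irrefl 0)
  | succ m ih =>
    intro slovo h0 hm
    have hrec : ∀ s : String, poslednje_veliko_slovo s recenica (-((m + 1 : Nat) : Int) + 1)
        = pvOut s recenica.toList := by
      intro s
      have h1 : -((m + 1 : Nat) : Int) + 1 = -(m : Int) := by push_cast; ring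
      rw [h1]
      rcases Nat.eq_zero_or_pos m with hz | hp
      · subst hz
        have h2 : -((0 : Nat) : Int) = ((0 : Nat) : Int) := by norm_num
        rw [h2, pvA_nonneg' recenica 0 s (by omega)]
        simp
      · exact ih s hp (by omega)
    have hidx : recenica.toList.length - (m + 1) < recenica.toList.length := by omega
    have hg : PySem.List.pyGet? recenica.toList (-((m + 1 : Nat) : Int))
        = some (recenica.toList[recenica.toList.length - (m + 1)]) := by
      rw [PySem.List.pyGet?_neg_natCast recenica.toList (m + 1) (by omega) hm]
      simp [List.getElem?_eq_getElem hidx]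
    unfold poslednje_veliko_slovo
    rw [if_neg (by push_cast; omega)]
    split
    · next heq => rw [hg] at heq; cases heq
    · next c heq =>
      rw [hg] at heq
      injection heq with heq; subst heq
      split_ifs with hu
      · rw [hrec]
        apply pvOut_congr
        apply pvFindUpper_ne_none (c := recenica.toList[recenica.toList.length - (m + 1)])
        · exact List.mem_reverse.2 (List.getElem_mem hidx)
        · exact hu
      · exact hrec slovo

-- ===== VERDICT (by name: the statement is the Claim_ definition above) =====
theorem poslednje_veliko_slovo_spec : Claim_equal_poslednje_veliko_slovo := by
  intro slovo recenica i _ hpre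
  unfold Pre_poslednje_veliko_slovo at hpre
  unfold Spec_poslednje_veliko_slovo
  rw [pvAlt_eq]
  by_cases hnn : (0:Int) ≤ i
  · have hmax : max i 0 = i := max_eq_left hnn
    have hi : i = ((i.toNat : Nat) : Int) := (Int.toNat_of_nonneg hnn).symm
    rw [hmax, hi, pvA_nonneg' recenica i.toNat slovo (by omega), Int.toNat_natCast]
  · have hmax : max i 0 = 0 := max_eq_right (by omega)
    have hm : i = -(((-i).toNat : Nat) : Int) := by omega
    rw [hmax, hm, pvA_neg recenica (-i).toNat slovo (by omega) (by omega)]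
    simp
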